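-- pv_equiv track=rewrite | github.com/watermelon-nakatake/md_site_maker | howto/main_info.py | howto_insert_site_banner
-- ===== SOURCE A (Python) =====
-- def howto_insert_site_banner(long_str):
--     b_dict = {'hm': '<a href="../ds/happymail/" target="_blank" rel="nofollow" class="happy-otherb"'
--                     ' onclick="gtag(' + "'event', 'click', {'event_category': 'access','event_label': 'happy-otherb'}" +
--                     ');"><img src="../images/hm234x60_1214.gif" width="234" height="60" alt="ハッピーメール"></a>',
--               'mt': '<a href="../ds/mintj/" target="_blank" class="mintj-otherb" onclick="gtag' +
--                     "('event', 'click', {'event_category': 'access','event_label': 'mintj-otherb'})" +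
--                     ';"><img width="234" height="60" alt="Jメール" src="../images/mt234x60blue.gif"></a>',
--               'hm2': '<a href="../ds/happymail2/" target="_blank" rel="nofollow" '
--                      'class="happy2-otherb" onclick="gtag(' +
--                      "'event', 'click', {'event_category': 'access','event_label': 'happy2-otherb'})" +
--                      ';"><img src="../images/happymail50p200x150.gif" width="200" height="150" alt="ハッピーメール"></a>',
--               'max': '<a href="../ds/pcmax" target="_blank" rel="nofollow" class="max1-otherb" onclick="gtag' +
--                      "('event', 'click', {'event_category': 'access','event_label': 'max1-otherb'})" +
--                      ';"><img width="240" height="90" src="../images/pm240x90_02.gif" alt="PCMAX"></a>',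
--               'wk': '<a href="../ds/550909" target="_blank" rel="nofollow" class="waku-otherb"' +
--                     ' onclick="gtag' + "('event', 'click', {'event_category': 'access','event_label': 'waku-otherb'})"
--                     + ';"><img width="236" height="80" src="../images/wk236-80_2.png" alt="ワクワクメール"></a>'
--               }
--     for site_code in b_dict:
--         long_str = long_str.replace('%bn_' + site_code + '%', '<div class="center">' + b_dict[site_code] + '</div>')
--     return long_str
-- ===== SOURCE B (Python) =====
-- def howto_insert_site_banner(long_str):
--     b_dict = {'hm': '<a href="../ds/happymail/" target="_blank" rel="nofollow" class="happy-otherb"'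
--                     ' onclick="gtag(' + "'event', 'click', {'event_category': 'access','event_label': 'happy-otherb'}" +
--                     ');"><img src="../images/hm234x60_1214.gif" width="234" height="60" alt="ハッピーメール"></a>',
--               'mt': '<a href="../ds/mintj/" target="_blank" class="mintj-otherb" onclick="gtag' +
--                     "('event', 'click', {'event_category': 'access','event_label': 'mintj-otherb'})" +
--                     ';"><img width="234" height="60" alt="Jメール" src="../images/mt234x60blue.gif"></a>',
--               'hm2': '<a href="../ds/happymail2/" target="_blank" rel="nofollow" '
--                      'class="happy2-otherb" onclick="gtag(' +
--                      "'event', 'click', {'event_category': 'access','event_label': 'happy2-otherb'})" +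
--                      ';"><img src="../images/happymail50p200x150.gif" width="200" height="150" alt="ハッピーメール"></a>',
--               'max': '<a href="../ds/pcmax" target="_blank" rel="nofollow" class="max1-otherb" onclick="gtag' +
--                      "('event', 'click', {'event_category': 'access','event_label': 'max1-otherb'})" +
--                      ';"><img width="240" height="90" src="../images/pm240x90_02.gif" alt="PCMAX"></a>',
--               'wk': '<a href="../ds/550909" target="_blank" rel="nofollow" class="waku-otherb"' +
--                     ' onclick="gtag' + "('event', 'click', {'event_category': 'access','event_label': 'waku-otherb'})"
--                     + ';"><img width="236" height="80" src="../images/wk236-80_2.png" alt="ワクワクメール"></a>'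
--               }
--     # Single left-to-right scan: parse each '%bn_<code>%' token once instead of
--     # running five full replace passes over the string.
--     out = []
--     i = 0
--     n = len(long_str)
--     while i < n:
--         if long_str.startswith('%bn_', i):
--             close = long_str.find('%', i + 4)
--             if close != -1:
--                 code = long_str[i + 4:close]
--                 if code in b_dict:
--                     out.append('<div class="center">' + b_dict[code] + '</div>')
--                     i = close + 1
--                     continue
--         out.append(long_str[i])
--         i += 1
--     return ''.join(out)
-- ===== Notes on version B (the rewrite author's own statement) =====
-- stated objective: alternative
-- what changed: B replaces the five sequential full-string str.replace passes by one left-to-right scan that parses each '%bn_<code>%' token once and looks the code up in the dict, emitting unknown tokens unchanged.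
import Mathlib
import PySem

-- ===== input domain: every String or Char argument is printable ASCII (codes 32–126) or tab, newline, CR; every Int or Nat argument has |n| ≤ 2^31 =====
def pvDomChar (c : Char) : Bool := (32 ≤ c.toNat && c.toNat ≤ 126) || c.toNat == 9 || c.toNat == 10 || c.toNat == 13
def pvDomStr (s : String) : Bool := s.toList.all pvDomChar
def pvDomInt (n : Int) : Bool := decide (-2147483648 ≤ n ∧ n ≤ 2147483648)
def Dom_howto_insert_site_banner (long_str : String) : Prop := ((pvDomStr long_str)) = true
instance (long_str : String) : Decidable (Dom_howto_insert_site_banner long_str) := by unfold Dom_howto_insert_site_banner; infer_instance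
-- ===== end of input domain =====

-- B replaces A's five sequential full-string replace passes by one left-to-right scan
-- that parses each '%bn_<code>%' token once (objective: alternative single-pass algorithm).

-- ===== PORT A =====
def vhm : String := "<a href=\"../ds/happymail/\" target=\"_blank\" rel=\"nofollow\" class=\"happy-otherb\" onclick=\"gtag('event', 'click', {'event_category': 'access','event_label': 'happy-otherb'});\"><img src=\"../images/hm234x60_1214.gif\" width=\"234\" height=\"60\" alt=\"ハッピーメール\"></a>"
def vmt : String := "<a href=\"../ds/mintj/\" target=\"_blank\" class=\"mintj-otherb\" onclick=\"gtag('event', 'click', {'event_category': 'access','event_label': 'mintj-otherb'});\"><img width=\"234\" height=\"60\" alt=\"Jメール\" src=\"../images/mt234x60blue.gif\"></a>"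
def vhm2 : String := "<a href=\"../ds/happymail2/\" target=\"_blank\" rel=\"nofollow\" class=\"happy2-otherb\" onclick=\"gtag('event', 'click', {'event_category': 'access','event_label': 'happy2-otherb'});\"><img src=\"../images/happymail50p200x150.gif\" width=\"200\" height=\"150\" alt=\"ハッピーメール\"></a>"
def vmax : String := "<a href=\"../ds/pcmax\" target=\"_blank\" rel=\"nofollow\" class=\"max1-otherb\" onclick=\"gtag('event', 'click', {'event_category': 'access','event_label': 'max1-otherb'});\"><img width=\"240\" height=\"90\" src=\"../images/pm240x90_02.gif\" alt=\"PCMAX\"></a>"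
def vwk : String := "<a href=\"../ds/550909\" target=\"_blank\" rel=\"nofollow\" class=\"waku-otherb\" onclick=\"gtag('event', 'click', {'event_category': 'access','event_label': 'waku-otherb'});\"><img width=\"236\" height=\"80\" src=\"../images/wk236-80_2.png\" alt=\"ワクワクメール\"></a>"

def bDict : PySem.Dict String String :=
  PySem.Dict.ofList [("hm", vhm), ("mt", vmt), ("hm2", vhm2), ("max", vmax), ("wk", vwk)]

def howto_insert_site_banner (long_str : String) : String :=
  bDict.keys.foldl
    (fun s code =>
      PySem.Str.replace s ("%bn_" ++ code ++ "%")
        ("<div class=\"center\">" ++ bDict.getD code "" ++ "</div>"))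
    long_str

-- ===== PORT B =====
-- the dict as a lookup on the parsed code ('code in b_dict' + 'b_dict[code]')
def bval? (code : List Char) : Option String :=
  if code = "hm".toList then some vhm
  else if code = "mt".toList then some vmt
  else if code = "hm2".toList then some vhm2
  else if code = "max".toList then some vmax
  else if code = "wk".toList then some vwk
  else none

-- the while loop of Source B: at each position, either parse a '%bn_<code>%' token
-- (code = chars up to the next '%', as found by str.find) or copy one character
def scanB : List Char → List Char
  | [] => []
  | c :: t =>
    if ("%bn_".toList).isPrefixOf (c :: t) then
      -- after = s[i+4:]; rest = s[close:] (empty when find returned -1)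
      let code := (t.drop 3).takeWhile (· ≠ '%')
      let rest := (t.drop 3).dropWhile (· ≠ '%')
      if rest ≠ [] then
        match bval? code with
        | some v => "<div class=\"center\">".toList ++ v.toList ++ "</div>".toList ++ scanB (rest.drop 1)
        | none => c :: scanB t
      else c :: scanB t
    else c :: scanB t
termination_by s => s.length
decreasing_by
  all_goals first
  | (simp; done)
  | (have h1 : ((t.drop 3).dropWhile (· ≠ '%')).length ≤ t.length := by
       calc ((t.drop 3).dropWhile (· ≠ '%')).length ≤ (t.drop 3).length :=
              List.length_dropWhile_le _ _
         _ ≤ t.length := by simp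
     simp only [List.length_drop, List.length_cons]
     omega)

def howto_insert_site_banner_alt (long_str : String) : String :=
  String.ofList (scanB long_str.toList)

-- ===== PRECONDITION & SPEC =====
-- Pre_ excludes strings in which a banner token's closing '%' is immediately followed by
-- 'bn_' (so it can double as the opening '%' of another token): there A's result is an
-- artefact of dict iteration order (which overlapping token wins), a corner no caller specifies.
def Pre_howto_insert_site_banner (long_str : String) : Prop :=
  ∀ p ∈ ["%bn_hm%bn_", "%bn_mt%bn_", "%bn_hm2%bn_", "%bn_max%bn_", "%bn_wk%bn_"],
    ¬ (p.toList <:+: long_str.toList)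
instance (long_str : String) : Decidable (Pre_howto_insert_site_banner long_str) := by
  unfold Pre_howto_insert_site_banner; infer_instance

def pvWitness_howto_insert_site_banner : String := "ad: %bn_hm% and %bn_xx% here"

def Spec_howto_insert_site_banner (long_str : String) (out : String) : Prop := out = howto_insert_site_banner_alt long_str
instance (long_str : String) (out : String) : Decidable (Spec_howto_insert_site_banner long_str out) := by unfold Spec_howto_insert_site_banner; infer_instance

-- ===== CLAIM (what is proved, stated in full; the proofs are below) =====
def Claim_equal_howto_insert_site_banner : Prop := ∀ (long_str : String), Dom_howto_insert_site_banner long_str → Pre_howto_insert_site_banner long_str → Spec_howto_insert_site_banner long_str (howto_insert_site_banner long_str)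

-- ===== LEMMAS AND PROOFS =====

-- Python str.replace (nonempty pattern) as a plain structural recursion
def replA (old new : List Char) : List Char → List Char
  | [] => []
  | c :: t =>
    if old.isPrefixOf (c :: t) then new ++ replA old new (t.drop (old.length - 1))
    else c :: replA old new t
termination_by s => s.length
decreasing_by
  all_goals simp only [List.length_drop, List.length_cons]
  all_goals omega

theorem go_eq_replA (old new : List Char) (h : old ≠ []) :
    ∀ (fuel : Nat) (l acc : List Char), l.length ≤ fuel →
      PySem.Chars.replace.go old new fuel l acc = acc.reverse ++ replA old new l := by
  intro fuel
  induction fuel with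
  | zero =>
    intro l acc hl
    have : l = [] := by cases l <;> simp_all
    subst this
    rw [PySem.Chars.replace.go.eq_def]
    simp [replA]
  | succ fuel ih =>
    intro l acc hl
    cases l with
    | nil => rw [PySem.Chars.replace.go.eq_def]; simp [replA]
    | cons c t =>
      rw [PySem.Chars.replace.go.eq_def]
      simp only []
      by_cases hp : old.isPrefixOf (c :: t)
      · rw [if_pos hp]
        obtain ⟨o, os, rfl⟩ : ∃ o os, old = o :: os := by
          cases old with
          | nil => exact absurd rfl h
          | cons o os => exact ⟨o, os, rfl⟩
        have hdrop : List.drop (o :: os).length (c :: t) = t.drop ((o :: os).length - 1) := by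
          simp
        rw [hdrop, ih _ _ (by simp at hl ⊢; omega)]
        conv_rhs => rw [replA]
        rw [if_pos hp]
        simp
      · rw [if_neg hp, ih _ _ (by simp at hl ⊢; omega)]
        conv_rhs => rw [replA]
        rw [if_neg hp]
        simp

theorem replace_eq_replA (old new s : List Char) (h : old ≠ []) :
    PySem.Chars.replace s old new = replA old new s := by
  rw [PySem.Chars.replace]
  rw [if_neg (by simpa using h)]
  simpa using go_eq_replA old new h s.length s [] le_rfl

-- keys, tokens, replacements at the List Char level
def keysL : List (List Char) := ["hm".toList, "mt".toList, "hm2".toList, "max".toList, "wk".toList]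
def tokL (k : List Char) : List Char := '%' :: 'b' :: 'n' :: '_' :: (k ++ ['%'])
def repL (k : List Char) : List Char :=
  "<div class=\"center\">".toList ++ ((bval? k).getD "").toList ++ "</div>".toList
def passK (k s : List Char) : List Char := replA (tokL k) (repL k) s
def runAll (s : List Char) : List Char := keysL.foldl (fun s k => passK k s) s
def PreL (s : List Char) : Prop :=
  ∀ k ∈ keysL, ¬ (('%' :: 'b' :: 'n' :: '_' :: (k ++ ['%', 'b', 'n', '_'])) <:+: s)

theorem replA_skip (old new : List Char) (c : Char) (t : List Char)
    (h : ¬ old <+: (c :: t)) : replA old new (c :: t) = c :: replA old new t := by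
  rw [replA]
  rw [if_neg (by simpa [List.isPrefixOf_iff_prefix] using h)]

theorem replA_hit (o : Char) (os new t : List Char) :
    replA (o :: os) new ((o :: os) ++ t) = new ++ replA (o :: os) new t := by
  rw [List.cons_append, replA]
  rw [if_pos (by simp [List.isPrefixOf_iff_prefix])]
  congr 1
  have h1 : (o :: os).length - 1 = os.length := by simp
  rw [h1, List.drop_left]

theorem replA_front (old new u v : List Char) (ho : old.head? = some '%')
    (hu : '%' ∉ u) : replA old new (u ++ v) = u ++ replA old new v := by
  induction u with
  | nil => simp
  | cons a u ih =>
    rw [List.cons_append, replA_skip]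
    · rw [ih (fun hm => hu (List.mem_cons_of_mem a hm))]; simp
    · intro hp
      obtain ⟨o, ot, rfl⟩ : ∃ o ot, old = o :: ot := by
        cases old with
        | nil => simp at ho
        | cons o ot => exact ⟨o, ot, rfl⟩
      have h1 : o = '%' := by simpa using ho
      have h2 : o = a := (List.cons_prefix_cons.mp hp).1
      exact hu (by simp [← h2, h1])

theorem replA_noCreate (old new u w : List Char) (hn : new.head? = some '<')
    (hw : '<' ∉ w) (h : w <+: replA old new u) : w <+: u := by
  induction u using replA.induct old generalizing w with
  | case1 =>
    simp only [replA] at h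
    simpa using h
  | case2 c t hp ih =>
    rw [replA, if_pos hp] at h
    cases w with
    | nil => exact List.nil_prefix
    | cons a w' =>
      exfalso
      obtain ⟨n0, nt, rfl⟩ : ∃ n0 nt, new = n0 :: nt := by
        cases new with
        | nil => simp at hn
        | cons n0 nt => exact ⟨n0, nt, rfl⟩
      have h0 : n0 = '<' := by simpa using hn
      have h2 : a = n0 := (List.cons_prefix_cons.mp (by simpa using h)).1
      exact hw (by simp [h2, h0])
  | case3 c t hp ih =>
    rw [replA, if_neg hp] at h
    cases w with
    | nil => exact List.nil_prefix
    | cons a w' =>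
      rcases List.cons_prefix_cons.mp h with ⟨rfl, h'⟩
      exact List.cons_prefix_cons.mpr ⟨rfl, ih w' (fun hm => hw (List.mem_cons_of_mem a hm)) h'⟩

theorem keyclash (j : List Char) : ∀ (k t : List Char), '%' ∉ j → '%' ∉ k → j ≠ k →
    ¬ ((j ++ ['%']) <+: (k ++ '%' :: t)) := by
  induction j with
  | nil =>
    intro k t _ hk hne hp
    cases k with
    | nil => exact hne rfl
    | cons b k' =>
      have : '%' = b := by simpa using hp
      exact hk (by simp [← this])
  | cons a j' ih =>
    intro k t hj hk hne hp
    cases k with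
    | nil =>
      have : a = '%' := (List.cons_prefix_cons.mp (by simpa using hp)).1
      exact hj (by simp [this])
    | cons b k' =>
      rcases List.cons_prefix_cons.mp (by simpa using hp) with ⟨rfl, h'⟩
      exact ih k' t (fun hm => hj (List.mem_cons_of_mem _ hm))
        (fun hm => hk (List.mem_cons_of_mem _ hm))
        (fun he => hne (by rw [he])) (by simpa using h')

theorem peelTok (j k t new : List Char) (hj : '%' ∉ j) (hk : '%' ∉ k) (hne : j ≠ k)
    (hstr : ¬ (('b' :: 'n' :: '_' :: (j ++ ['%'])) <+: t)) :
    replA (tokL j) new (tokL k ++ t) = tokL k ++ replA (tokL j) new t := by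
  have hsplit : tokL k ++ t = '%' :: 'b' :: 'n' :: '_' :: (k ++ '%' :: t) := by
    simp [tokL]
  rw [hsplit]
  have h0 : ¬ tokL j <+: ('%' :: 'b' :: 'n' :: '_' :: (k ++ '%' :: t)) := by
    intro hp
    have h' : (j ++ ['%']) <+: (k ++ '%' :: t) := by
      simpa [tokL, List.cons_prefix_cons] using hp
    exact keyclash j k t hj hk hne h'
  rw [replA_skip _ _ _ _ h0]
  have hb : ¬ tokL j <+: ('b' :: 'n' :: '_' :: (k ++ '%' :: t)) := by
    simp [tokL, List.cons_prefix_cons]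
  rw [replA_skip _ _ _ _ hb]
  have hn2 : ¬ tokL j <+: ('n' :: '_' :: (k ++ '%' :: t)) := by
    simp [tokL, List.cons_prefix_cons]
  rw [replA_skip _ _ _ _ hn2]
  have hu2 : ¬ tokL j <+: ('_' :: (k ++ '%' :: t)) := by
    simp [tokL, List.cons_prefix_cons]
  rw [replA_skip _ _ _ _ hu2]
  rw [replA_front (tokL j) new k ('%' :: t) rfl hk]
  have hlast : ¬ tokL j <+: ('%' :: t) := by
    intro hp
    exact hstr (by simpa [tokL, List.cons_prefix_cons] using hp)
  rw [replA_skip _ _ _ _ hlast]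
  simp [tokL]

-- concrete facts about the five keys
theorem keys_small : ∀ j ∈ keysL, '%' ∉ j ∧ '<' ∉ j ∧ (bval? j).isSome := by decide

theorem rep_head : ∀ j ∈ keysL, (repL j).head? = some '<' := by decide

set_option maxRecDepth 40000 in
set_option maxHeartbeats 1000000 in
theorem rep_nomem : ∀ j ∈ keysL, '%' ∉ repL j := by decide

-- a prefix that a replace pass cannot create: anything without '<'
theorem pass_noCreate (j : List Char) (hj : j ∈ keysL) (w u : List Char)
    (hw : '<' ∉ w) (h : w <+: passK j u) : w <+: u := by
  refine replA_noCreate (tokL j) (repL j) u w ?_ hw h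
  exact rep_head j hj

theorem tok_parts_noLt (j : List Char) (hj : j ∈ keysL) :
    '<' ∉ ('b' :: 'n' :: '_' :: (j ++ ['%'])) := by
  intro hm
  simp only [List.mem_cons, List.mem_append, ] at hm
  rcases hm with h | h | h | h | h
  · exact absurd h (by decide)
  · exact absurd h (by decide)
  · exact absurd h (by decide)
  · exact (keys_small j hj).2.1 h
  · exact absurd h (by decide)

theorem runSkip (c : Char) (t : List Char) :
    ∀ ks, (∀ j ∈ ks, j ∈ keysL) → (∀ j ∈ ks, ¬ (tokL j <+: c :: t)) →
      List.foldl (fun s k => passK k s) (c :: t) ks = c :: List.foldl (fun s k => passK k s) t ks := by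
  intro ks
  induction ks generalizing t with
  | nil => intro _ _; rfl
  | cons j ks' ih =>
    intro hsub hno
    have hj := hsub j (List.mem_cons_self)
    have hstep : passK j (c :: t) = c :: passK j t :=
      replA_skip _ _ _ _ (hno j (List.mem_cons_self))
    simp only [List.foldl_cons, hstep]
    refine ih (passK j t) (fun j' hj' => hsub j' (List.mem_cons_of_mem j hj')) ?_
    intro j' hj' hp
    have hj'k := hsub j' (List.mem_cons_of_mem j hj')
    rcases List.cons_prefix_cons.mp hp with ⟨hc, hp'⟩
    have hp2 : ('b' :: 'n' :: '_' :: (j' ++ ['%'])) <+: t :=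
      pass_noCreate j hj _ _ (tok_parts_noLt j' hj'k) hp'
    exact hno j' (List.mem_cons_of_mem j hj')
      (List.cons_prefix_cons.mpr ⟨hc, hp2⟩)

theorem runFront (u : List Char) (hu : '%' ∉ u) :
    ∀ ks (v : List Char), (∀ j ∈ ks, j ∈ keysL) →
      List.foldl (fun s k => passK k s) (u ++ v) ks = u ++ List.foldl (fun s k => passK k s) v ks := by
  intro ks
  induction ks with
  | nil => intro v _; rfl
  | cons j ks' ih =>
    intro v hsub
    have hstep : passK j (u ++ v) = u ++ passK j v :=
      replA_front _ _ _ _ rfl hu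
    simp only [List.foldl_cons, hstep]
    exact ih (passK j v) (fun j' hj' => hsub j' (List.mem_cons_of_mem j hj'))

theorem runTok (k : List Char) (hk0 : k ∈ keysL) :
    ∀ ks (t : List Char), (∀ j ∈ ks, j ∈ keysL) → k ∈ ks →
      (∀ j ∈ ks, j ≠ k → ¬ (('b' :: 'n' :: '_' :: (j ++ ['%'])) <+: t)) →
      List.foldl (fun s k => passK k s) (tokL k ++ t) ks = repL k ++ List.foldl (fun s k => passK k s) t ks := by
  intro ks
  induction ks with
  | nil => intro t hsub h; cases h
  | cons j ks' ih =>
    intro t hsub hmem hstr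
    by_cases hjk : j = k
    · subst hjk
      have hstep : passK j (tokL j ++ t) = repL j ++ passK j t := by
        show replA (tokL j) (repL j) (tokL j ++ t) = _
        exact replA_hit '%' ('b' :: 'n' :: '_' :: (j ++ ['%'])) (repL j) t
      simp only [List.foldl_cons, hstep]
      exact runFront (repL j) (rep_nomem j hk0) ks' (passK j t)
        (fun j' hj' => hsub j' (List.mem_cons_of_mem j hj'))
    · have hkks' : k ∈ ks' := by
        rcases List.mem_cons.mp hmem with h | h
        · exact absurd h.symm hjk
        · exact h
      have hj := hsub j (List.mem_cons_self)
      have hstep : passK j (tokL k ++ t) = tokL k ++ passK j t :=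
        peelTok j k t (repL j) (keys_small j hj).1 (keys_small k hk0).1 hjk
          (hstr j (List.mem_cons_self) hjk)
      simp only [List.foldl_cons, hstep]
      refine ih (passK j t) (fun j' hj' => hsub j' (List.mem_cons_of_mem j hj')) hkks' ?_
      intro j' hj' hne hp
      have hj'k := hsub j' (List.mem_cons_of_mem j hj')
      exact hstr j' (List.mem_cons_of_mem j hj') hne
        (pass_noCreate j hj _ _ (tok_parts_noLt j' hj'k) hp)

theorem bval?_mem (code : List Char) (v : String) (h : bval? code = some v) :
    code ∈ keysL := by
  unfold bval? at h
  split_ifs at h with h1 h2 h3 h4 h5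
  · subst h1; decide
  · subst h2; decide
  · subst h3; decide
  · subst h4; decide
  · subst h5; decide

theorem runAll_nil : runAll [] = [] := by
  simp [runAll, keysL, passK, replA]

theorem PreL_suffix (s t : List Char) (h : t <:+ s) (hp : PreL s) : PreL t :=
  fun k hk hinf => hp k hk (hinf.trans h.isInfix)

theorem tok_prefix_shape (j : List Char) (c : Char) (t : List Char)
    (hp : tokL j <+: c :: t) :
    c = '%' ∧ ∃ r, t = 'b' :: 'n' :: '_' :: (j ++ '%' :: r) := by
  obtain ⟨r, hr⟩ := hp
  refine ⟨?_, r, ?_⟩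
  · have := congrArg List.head? hr
    simpa [tokL] using this.symm
  · have := congrArg List.tail hr
    simp only [tokL, List.cons_append, List.tail_cons] at this
    rw [← this]
    simp

theorem no_tok_case (c : Char) (t : List Char)
    (hcond : ∀ j ∈ keysL, ¬ (tokL j <+: c :: t)) (hpre : PreL (c :: t))
    (ih : PreL t → runAll t = scanB t) : runAll (c :: t) = c :: scanB t := by
  unfold runAll
  rw [runSkip c t keysL (fun _ h => h) hcond]
  rw [show List.foldl (fun s k => passK k s) t keysL = runAll t from rfl]
  rw [ih (PreL_suffix _ _ ⟨[c], rfl⟩ hpre)]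

theorem main_list (s : List Char) (hpre : PreL s) : runAll s = scanB s := by
  induction s using scanB.induct with
  | case1 => simp [runAll_nil, scanB]
  | case2 c t h1 code rest hne v hbv ih =>
    have hcodedef : code = List.takeWhile (fun x => decide (x ≠ '%')) (List.drop 3 t) := rfl
    have hrestdef : rest = List.dropWhile (fun x => decide (x ≠ '%')) (List.drop 3 t) := rfl
    clear_value code rest
    obtain ⟨r0, hr0⟩ := List.isPrefixOf_iff_prefix.mp h1
    have hct : c :: t = '%' :: 'b' :: 'n' :: '_' :: r0 := hr0.symm
    have hc : c = '%' := by injection hct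
    have ht : t = 'b' :: 'n' :: '_' :: r0 := by injection hct
    have hdrop : List.drop 3 t = r0 := by rw [ht]; rfl
    rw [hdrop] at hcodedef hrestdef
    obtain ⟨a, rs, ha⟩ := List.exists_cons_of_ne_nil hne
    have ha2 : a = '%' := by
      have h5 := List.head?_dropWhile_not (fun x => decide (x ≠ '%')) r0
      rw [← hrestdef, ha] at h5
      simpa using h5
    subst ha2
    have hsplit : r0 = code ++ ('%' :: rs) := by
      conv_lhs => rw [← List.takeWhile_append_dropWhile
        (p := fun x => decide (x ≠ '%')) (l := r0)]
      rw [← hcodedef, ← hrestdef, ha]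
    have hcodeNoPct : '%' ∉ code := by
      intro hm
      rw [hcodedef] at hm
      have := List.mem_takeWhile_imp hm
      simp at this
    have hmem : code ∈ keysL := bval?_mem code v hbv
    have hs2 : c :: t = tokL code ++ rs := by
      rw [hc, ht, hsplit]
      simp [tokL]
    have hstr : ∀ j ∈ keysL, j ≠ code → ¬ (('b' :: 'n' :: '_' :: (j ++ ['%'])) <+: rs) := by
      intro j hj hnej hp2
      have h3p : ['b', 'n', '_'] <+: rs := by
        have h4 := List.IsPrefix.take hp2 3
        exact h4.trans (List.take_prefix 3 rs)
      apply hpre code hmem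
      apply List.IsPrefix.isInfix
      rw [hs2]
      show ('%' :: 'b' :: 'n' :: '_' :: (code ++ ['%', 'b', 'n', '_'])) <+: (tokL code ++ rs)
      have hx : code ++ ['%', 'b', 'n', '_'] <+: code ++ '%' :: rs := by
        rw [List.prefix_append_right_inj]
        exact List.cons_prefix_cons.mpr ⟨rfl, h3p⟩
      simpa [tokL, List.cons_prefix_cons, List.append_assoc] using hx
    have hrun : runAll (c :: t) = repL code ++ runAll rs := by
      rw [hs2]
      exact runTok code hmem keysL rs (fun _ h => h) hmem hstr
    have hpres : PreL rs :=
      PreL_suffix (c :: t) rs ⟨tokL code, hs2.symm⟩ hpre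
    have hih : runAll rs = scanB rs := by
      rw [ha] at ih
      exact ih hpres
    rw [hrun, hih]
    conv_rhs => rw [scanB]
    rw [if_pos h1]
    simp only [hdrop, ← hcodedef, ← hrestdef, hbv, ha, ne_eq, reduceCtorEq,
      not_false_eq_true, if_true, List.drop_succ_cons, List.drop_zero]
    simp [repL, hbv]
  | case3 c t h1 code rest hne hnone ih =>
    have hcodedef : code = List.takeWhile (fun x => decide (x ≠ '%')) (List.drop 3 t) := rfl
    have hrestdef : rest = List.dropWhile (fun x => decide (x ≠ '%')) (List.drop 3 t) := rfl
    clear_value code rest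
    have hcond : ∀ j ∈ keysL, ¬ (tokL j <+: c :: t) := by
      intro j hj hp2
      obtain ⟨hc, r, ht⟩ := tok_prefix_shape j c t hp2
      have hjall : ∀ x ∈ j, (fun x => decide (x ≠ '%')) x = true := by
        intro x hx
        have hxne : x ≠ '%' := fun he => (keys_small j hj).1 (he ▸ hx)
        simpa using hxne
      have hcode : code = j := by
        rw [hcodedef, ht]
        show (j ++ '%' :: r).takeWhile (fun x => decide (x ≠ '%')) = j
        rw [List.takeWhile_append]
        rw [if_pos (by rw [List.takeWhile_eq_self_iff.mpr hjall])]
        simp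
      rw [hcode] at hnone
      have hsome := (keys_small j hj).2.2
      rw [hnone] at hsome
      simp at hsome
    rw [no_tok_case c t hcond hpre ih]
    conv_rhs => rw [scanB]
    rw [if_pos h1]
    simp only [← hcodedef, ← hrestdef, hne, hnone, ne_eq, not_false_eq_true, if_true]
  | case4 c t h1 rest hne ih =>
    have hrestdef : rest = List.dropWhile (fun x => decide (x ≠ '%')) (List.drop 3 t) := rfl
    clear_value rest
    have hcond : ∀ j ∈ keysL, ¬ (tokL j <+: c :: t) := by
      intro j hj hp2
      obtain ⟨hc, r, ht⟩ := tok_prefix_shape j c t hp2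
      apply hne
      rw [hrestdef, ht]
      show (j ++ '%' :: r).dropWhile (fun x => decide (x ≠ '%')) ≠ []
      rw [List.dropWhile_append]
      have hjnil : (j.dropWhile (fun x => decide (x ≠ '%'))) = [] := by
        rw [List.dropWhile_eq_nil_iff]
        intro x hx
        have hxne : x ≠ '%' := fun he => (keys_small j hj).1 (he ▸ hx)
        simpa using hxne
      rw [hjnil]
      simp
    rw [no_tok_case c t hcond hpre ih]
    conv_rhs => rw [scanB]
    rw [if_pos h1]
    simp only [← hrestdef, hne, ne_eq, if_false]
  | case5 c t h1 ih =>
    have hcond : ∀ j ∈ keysL, ¬ (tokL j <+: c :: t) := by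
      intro j hj hp2
      apply h1
      rw [List.isPrefixOf_iff_prefix]
      exact List.IsPrefix.trans ⟨j ++ ['%'], rfl⟩ hp2
    rw [no_tok_case c t hcond hpre ih]
    conv_rhs => rw [scanB]
    rw [if_neg h1]

theorem tok_toList : ∀ k : String, ("%bn_" ++ k ++ "%").toList = tokL k.toList := by
  intro k
  simp [String.toList_append, tokL]

theorem getD_hm : bDict.getD "hm" "" = vhm := rfl
theorem getD_mt : bDict.getD "mt" "" = vmt := rfl
theorem getD_hm2 : bDict.getD "hm2" "" = vhm2 := rfl
theorem getD_max : bDict.getD "max" "" = vmax := rfl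
theorem getD_wk : bDict.getD "wk" "" = vwk := rfl

theorem rep_toList (k : String) (v : String) (hb : bval? k.toList = some v)
    (hd : bDict.getD k "" = v) :
    ("<div class=\"center\">" ++ bDict.getD k "" ++ "</div>").toList = repL k.toList := by
  rw [hd, repL, hb]
  simp [String.toList_append]

theorem A_eq (ls : String) : howto_insert_site_banner ls = String.ofList (runAll ls.toList) := by
  have hkeys : bDict.keys = ["hm", "mt", "hm2", "max", "wk"] := by rfl
  unfold howto_insert_site_banner
  rw [hkeys]
  simp only [List.foldl_cons, List.foldl_nil]
  unfold PySem.Str.replace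
  simp only [String.toList_ofList]
  rw [replace_eq_replA _ _ _ (by decide), replace_eq_replA _ _ _ (by decide),
    replace_eq_replA _ _ _ (by decide), replace_eq_replA _ _ _ (by decide),
    replace_eq_replA _ _ _ (by decide)]
  rw [tok_toList "hm", tok_toList "mt", tok_toList "hm2", tok_toList "max", tok_toList "wk"]
  rw [rep_toList "hm" vhm rfl getD_hm, rep_toList "mt" vmt rfl getD_mt,
    rep_toList "hm2" vhm2 rfl getD_hm2, rep_toList "max" vmax rfl getD_max,
    rep_toList "wk" vwk rfl getD_wk]
  rfl

-- ===== VERDICT (by name: the statement is the Claim_ definition above) =====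
theorem howto_insert_site_banner_spec : Claim_equal_howto_insert_site_banner := by
  intro ls _ hpre
  show howto_insert_site_banner ls = howto_insert_site_banner_alt ls
  rw [A_eq, howto_insert_site_banner_alt]
  refine congrArg String.ofList (main_list ls.toList ?_)
  intro k hk
  fin_cases hk
  · exact fun h => hpre "%bn_hm%bn_" (by simp)
      (by rw [show "%bn_hm%bn_".toList =
        ('%' :: 'b' :: 'n' :: '_' :: ("hm".toList ++ ['%', 'b', 'n', '_'])) from by decide]; exact h)
  · exact fun h => hpre "%bn_mt%bn_" (by simp)
      (by rw [show "%bn_mt%bn_".toList =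
        ('%' :: 'b' :: 'n' :: '_' :: ("mt".toList ++ ['%', 'b', 'n', '_'])) from by decide]; exact h)
  · exact fun h => hpre "%bn_hm2%bn_" (by simp)
      (by rw [show "%bn_hm2%bn_".toList =
        ('%' :: 'b' :: 'n' :: '_' :: ("hm2".toList ++ ['%', 'b', 'n', '_'])) from by decide]; exact h)
  · exact fun h => hpre "%bn_max%bn_" (by simp)
      (by rw [show "%bn_max%bn_".toList =
        ('%' :: 'b' :: 'n' :: '_' :: ("max".toList ++ ['%', 'b', 'n', '_'])) from by decide]; exact h)
  · exact fun h => hpre "%bn_wk%bn_" (by simp)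
      (by rw [show "%bn_wk%bn_".toList =
        ('%' :: 'b' :: 'n' :: '_' :: ("wk".toList ++ ['%', 'b', 'n', '_'])) from by decide]; exact h)
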